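-- pv_equiv track=rewrite | github.com/francesco20262026/nexus-admin-dashboard | fix_router_windoc.py | find_section_start
-- ===== SOURCE A (Python) =====
-- def find_section_start(lines, marker):
--     for i, line in enumerate(lines):
--         if marker in line:
--             # Walk back to get the preceding comment block
--             j = i
--             while j > 0 and (lines[j-1].strip().startswith('#') or lines[j-1].strip() == ''):
--                 j -= 1
--             return j
--     return None
-- ===== SOURCE B (Python) =====
-- def find_section_start(lines, marker):
--     block_start = None  # start index of the current run of comment/blank lines, if any
--     for i, line in enumerate(lines):
--         if marker in line:
--             return block_start if block_start is not None else i
--         s = line.strip()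
--         if s.startswith('#') or s == '':
--             if block_start is None:
--                 block_start = i
--         else:
--             block_start = None
--     return None
-- ===== Notes on version B (the rewrite author's own statement) =====
-- stated objective: alternative
-- what changed: Replaced the find-then-backtrack two-phase scan (with an inner while walking back over the preceding comment/blank run) by a single forward pass that maintains the run's start index in a state variable, so no line is ever re-read.
import Mathlib
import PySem

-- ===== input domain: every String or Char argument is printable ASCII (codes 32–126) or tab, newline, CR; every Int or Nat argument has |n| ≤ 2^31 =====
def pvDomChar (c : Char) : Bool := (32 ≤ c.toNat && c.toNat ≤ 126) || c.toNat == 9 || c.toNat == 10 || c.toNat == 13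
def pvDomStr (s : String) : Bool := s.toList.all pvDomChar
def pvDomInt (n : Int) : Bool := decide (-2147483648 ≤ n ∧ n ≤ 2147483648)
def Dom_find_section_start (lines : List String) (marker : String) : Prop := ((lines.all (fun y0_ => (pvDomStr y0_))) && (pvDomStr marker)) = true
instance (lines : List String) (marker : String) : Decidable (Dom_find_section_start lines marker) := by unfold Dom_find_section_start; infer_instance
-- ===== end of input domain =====

-- B replaces A's find-then-backtrack scan (inner while re-reading preceding lines) by a
-- single forward pass carrying the comment/blank run's start in a state variable (objective: alternative).

-- ===== PORT A =====
-- lines[j-1].strip().startswith('#') or lines[j-1].strip() == ''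
def pvCommentBlank (s : String) : Bool :=
  PySem.Str.startswith (PySem.Str.strip s) "#" || (PySem.Str.strip s == "")

-- the inner `while j > 0 and …: j -= 1`; lines[j-1] is always in range there (j ≤ enumerate index < len), so getD is exact
def pvWalkBack (lines : List String) : Nat → Nat
  | 0 => 0
  | j + 1 => if pvCommentBlank (lines.getD j "") then pvWalkBack lines j else j + 1

def pvAuxA (lines : List String) (marker : String) : Nat → List String → Option Int
  | _, [] => none
  | i, l :: rest =>
    if PySem.Str.isIn marker l then some ((pvWalkBack lines i : Nat) : Int)
    else pvAuxA lines marker (i + 1) rest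

def find_section_start (lines : List String) (marker : String) : Option Int :=
  pvAuxA lines marker 0 lines

-- ===== PORT B =====
def pvAuxB (marker : String) : Nat → Option Nat → List String → Option Int
  | _, _, [] => none
  | i, bs, l :: rest =>
    if PySem.Str.isIn marker l then some ((bs.getD i : Nat) : Int)
    else if pvCommentBlank l then pvAuxB marker (i + 1) (some (bs.getD i)) rest
    else pvAuxB marker (i + 1) none rest

def find_section_start_alt (lines : List String) (marker : String) : Option Int :=
  pvAuxB marker 0 none lines

-- ===== PRECONDITION & SPEC =====
def Spec_find_section_start (lines : List String) (marker : String) (out : Option Int) : Prop := out = find_section_start_alt lines marker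
instance (lines : List String) (marker : String) (out : Option Int) : Decidable (Spec_find_section_start lines marker out) := by unfold Spec_find_section_start; infer_instance

-- ===== CLAIM (what is proved, stated in full; the proofs are below) =====
def Claim_equal_find_section_start : Prop := ∀ (lines : List String) (marker : String), Dom_find_section_start lines marker → Spec_find_section_start lines marker (find_section_start lines marker)

-- ===== LEMMAS AND PROOFS =====
-- Invariant: pvWalkBack lines i = bs.getD i, i.e. B's state names exactly the index A's
-- backward walk from i would reach.
theorem pvAux_eq (lines : List String) (marker : String) :
    ∀ (rest : List String) (i : Nat) (bs : Option Nat),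
      lines.drop i = rest → pvWalkBack lines i = bs.getD i →
      pvAuxA lines marker i rest = pvAuxB marker i bs rest := by
  intro rest
  induction rest with
  | nil => intro i bs _ _; simp [pvAuxA, pvAuxB]
  | cons l rest ih =>
    intro i bs hdrop hinv
    have h0 : lines[i]? = some l := by
      have h : (List.drop i lines)[0]? = lines[i + 0]? := List.getElem?_drop
      rw [hdrop] at h; simpa using h.symm
    have hdrop' : lines.drop (i + 1) = rest := by
      have h := congrArg (List.drop 1) hdrop
      simpa [List.drop_drop, Nat.add_comm] using h
    by_cases hm : PySem.Chars.isIn marker.toList l.toList = true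
    · simp [pvAuxA, pvAuxB, PySem.Str.isIn, hm, hinv]
    · by_cases hc : pvCommentBlank l = true
      · have hw : pvWalkBack lines (i + 1) = bs.getD i := by
          simp [pvWalkBack, List.getD, h0, hc, hinv]
        simp only [pvAuxA, pvAuxB, PySem.Str.isIn, hm, hc]
        exact ih (i + 1) (some (bs.getD i)) hdrop' (by simp [hw])
      · simp only [pvAuxA, pvAuxB, PySem.Str.isIn, hm, hc, if_false]
        exact ih (i + 1) none hdrop' (by simp [pvWalkBack, List.getD, h0, hc])

-- ===== VERDICT (by name: the statement is the Claim_ definition above) =====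
theorem find_section_start_spec : Claim_equal_find_section_start := by
  intro lines marker _
  unfold Spec_find_section_start find_section_start find_section_start_alt
  exact pvAux_eq lines marker lines 0 none rfl rfl
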